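-- pv_equiv track=rewrite | github.com/mati-sya/wsd-wikt-ce | wsd_task/wsd_eval.py | mfs_evaluate
-- ===== SOURCE A (Python) =====
-- def mfs_evaluate(gold_standard_dict, more_senses):
--     """Function that takes as input
--         1. gold_standard_dict (dict): dictionary with key = sentence number and value = dict with
--                 [key = lemma of word and value = best word sense for the word as chosen by the annotator]
--         2. more_senses (dict): dictionary with key = sentence number and value = dict with
--                 [key = lemma of word and value = additional word senses for the word as chosen by the annotator]
--     and returns
--         1. same_ws (int): number of words in the gold_standard_dict with word sense number = 1
--         2. diff_ws (int): number of words in the gold_standard_dict with word sense number != 1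
--         3. good_ws (int): number of words in the more_senses dict whose additional word senses include 1
--         4. total (int): total number of words that are in the gold_standard_dict."""
--     same_ws = 0
--     diff_ws = 0
--     good_ws = 0
--     total = 0
--     for sent_no in gold_standard_dict:
--         for word in gold_standard_dict[sent_no]:
--             total += 1
--             if gold_standard_dict[sent_no][word] == 1:
--                 same_ws += 1
--             else:
--                 if (sent_no in more_senses) and (word in more_senses[sent_no]):
--                     if "1" in more_senses[sent_no][word]:
--                         good_ws += 1
--                     else:
--                         diff_ws += 1
--                 else:
--                     diff_ws += 1
--     return same_ws, diff_ws, good_ws, total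
-- ===== SOURCE B (Python) =====
-- def mfs_evaluate(gold_standard_dict, more_senses):
--     # single pass over gold for totals; good_ws driven by more_senses; diff_ws by arithmetic
--     total = sum(len(words) for words in gold_standard_dict.values())
--     same_ws = sum(1 for words in gold_standard_dict.values()
--                   for ws in words.values() if ws == 1)
--     good_ws = sum(1 for sent, words in more_senses.items()
--                   for word, senses in words.items()
--                   if sent in gold_standard_dict
--                   and word in gold_standard_dict[sent]
--                   and gold_standard_dict[sent][word] != 1
--                   and "1" in senses)
--     return same_ws, total - same_ws - good_ws, good_ws, total
-- ===== Notes on version B (the rewrite author's own statement) =====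
-- stated objective: alternative
-- what changed: good_ws is now counted by traversing more_senses (looking words up in the gold dict) instead of traversing gold and looking up more_senses, same_ws/total come from flat sums over gold, and diff_ws is derived arithmetically as total - same_ws - good_ws instead of by branch counting.
import Mathlib
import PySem

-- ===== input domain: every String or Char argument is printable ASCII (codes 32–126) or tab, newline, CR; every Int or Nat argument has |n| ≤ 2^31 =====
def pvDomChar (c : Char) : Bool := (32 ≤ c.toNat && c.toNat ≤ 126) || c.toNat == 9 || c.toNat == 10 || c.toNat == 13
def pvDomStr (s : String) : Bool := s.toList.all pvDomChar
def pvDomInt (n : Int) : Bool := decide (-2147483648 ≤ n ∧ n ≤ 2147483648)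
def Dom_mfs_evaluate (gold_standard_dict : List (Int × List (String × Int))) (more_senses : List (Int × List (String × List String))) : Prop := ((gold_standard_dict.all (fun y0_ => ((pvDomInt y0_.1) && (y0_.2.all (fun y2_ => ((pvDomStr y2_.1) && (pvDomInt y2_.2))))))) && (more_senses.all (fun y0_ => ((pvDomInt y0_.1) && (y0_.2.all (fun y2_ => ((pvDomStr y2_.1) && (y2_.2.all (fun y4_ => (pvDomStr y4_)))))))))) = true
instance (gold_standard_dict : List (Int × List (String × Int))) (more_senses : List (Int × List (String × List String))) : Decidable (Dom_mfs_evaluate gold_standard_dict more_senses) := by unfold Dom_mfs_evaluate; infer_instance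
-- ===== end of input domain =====

-- B drives good_ws by traversing more_senses (looking up the gold dict) instead of gold, and
-- derives diff_ws arithmetically as total - same_ws - good_ws (objective: alternative decomposition).

-- shared dict primitive: first-match lookup in an association list (Python dict lookup)
def pvLookup {α β : Type} [BEq α] (l : List (α × β)) (k : α) : Option β :=
  (l.find? (fun p => p.1 == k)).map (·.2)

-- ===== PORT A =====
-- A's inner loop body: one word of one sentence updates (same, diff, good, total)
def pvStepA (more_senses : List (Int × List (String × List String))) (sent_no : Int)
    (st : Int × Int × Int × Int) (q : String × Int) : Int × Int × Int × Int :=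
  match st with
  | (same_ws, diff_ws, good_ws, total) =>
    let total := total + 1
    if q.2 = 1 then (same_ws + 1, diff_ws, good_ws, total)
    else
      match pvLookup more_senses sent_no with
      | some inner =>
        match pvLookup inner q.1 with
        | some senses =>
          if senses.contains "1" then (same_ws, diff_ws, good_ws + 1, total)
          else (same_ws, diff_ws + 1, good_ws, total)
        | none => (same_ws, diff_ws + 1, good_ws, total)
      | none => (same_ws, diff_ws + 1, good_ws, total)

def mfs_evaluate (gold_standard_dict : List (Int × List (String × Int))) (more_senses : List (Int × List (String × List String))) : Int × Int × Int × Int :=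
  gold_standard_dict.foldl
    (fun st p => p.2.foldl (pvStepA more_senses p.1) st)
    ((0 : Int), (0 : Int), (0 : Int), (0 : Int))

-- ===== PORT B =====
-- B's good_ws test for one entry (word, senses) of more_senses[sent]
def pvGoodB (gold_standard_dict : List (Int × List (String × Int))) (sent : Int)
    (q : String × List String) : Bool :=
  match pvLookup gold_standard_dict sent with
  | some words =>
    match pvLookup words q.1 with
    | some v => decide (v ≠ 1) && q.2.contains "1"
    | none => false
  | none => false

def mfs_evaluate_alt (gold_standard_dict : List (Int × List (String × Int))) (more_senses : List (Int × List (String × List String))) : Int × Int × Int × Int :=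
  let total : Int := gold_standard_dict.foldl (fun acc p => acc + (p.2.length : Int)) 0
  let same_ws : Int := gold_standard_dict.foldl
    (fun acc p => acc + ((p.2.countP (fun q => q.2 == 1) : Nat) : Int)) 0
  let good_ws : Int := more_senses.foldl
    (fun acc p => acc + ((p.2.countP (pvGoodB gold_standard_dict p.1) : Nat) : Int)) 0
  (same_ws, total - same_ws - good_ws, good_ws, total)

-- ===== PRECONDITION & SPEC =====
-- Pre_ excludes association lists with duplicate keys (at either nesting level): such lists have
-- no Python dict counterpart, so A's behaviour on them is an artefact of the encoding.
def Pre_mfs_evaluate (gold_standard_dict : List (Int × List (String × Int))) (more_senses : List (Int × List (String × List String))) : Prop :=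
  (gold_standard_dict.map Prod.fst).Nodup ∧ (∀ p ∈ gold_standard_dict, (p.2.map Prod.fst).Nodup) ∧
  (more_senses.map Prod.fst).Nodup ∧ (∀ p ∈ more_senses, (p.2.map Prod.fst).Nodup)
instance (gold_standard_dict : List (Int × List (String × Int))) (more_senses : List (Int × List (String × List String))) : Decidable (Pre_mfs_evaluate gold_standard_dict more_senses) := by unfold Pre_mfs_evaluate; infer_instance

def pvWitness_mfs_evaluate : (List (Int × List (String × Int))) × (List (Int × List (String × List String))) :=
  ([(1, [("cat", 1), ("dog", 3)]), (2, [("cat", 2)])],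
   [(1, [("dog", ["1", "2"])]), (2, [("cat", ["3"])])])

def Spec_mfs_evaluate (gold_standard_dict : List (Int × List (String × Int))) (more_senses : List (Int × List (String × List String))) (out : Int × Int × Int × Int) : Prop := out = mfs_evaluate_alt gold_standard_dict more_senses
instance (gold_standard_dict : List (Int × List (String × Int))) (more_senses : List (Int × List (String × List String))) (out : Int × Int × Int × Int) : Decidable (Spec_mfs_evaluate gold_standard_dict more_senses out) := by unfold Spec_mfs_evaluate; infer_instance

-- ===== CLAIM (what is proved, stated in full; the proofs are below) =====
def Claim_equal_mfs_evaluate : Prop := ∀ (gold_standard_dict : List (Int × List (String × Int))) (more_senses : List (Int × List (String × List String))), Dom_mfs_evaluate gold_standard_dict more_senses → Pre_mfs_evaluate gold_standard_dict more_senses → Spec_mfs_evaluate gold_standard_dict more_senses (mfs_evaluate gold_standard_dict more_senses)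

-- ===== LEMMAS AND PROOFS =====

-- per-word predicates (proof-side)
def pSame (q : String × Int) : Bool := q.2 == 1
def pMore (more_senses : List (Int × List (String × List String))) (sent : Int) (w : String) : Bool :=
  match pvLookup more_senses sent with
  | some inner => match pvLookup inner w with
    | some senses => senses.contains "1"
    | none => false
  | none => false
def pGoldNe (gold : List (Int × List (String × Int))) (sent : Int) (w : String) : Bool :=
  match pvLookup gold sent with
  | some words => match pvLookup words w with
    | some v => decide (v ≠ 1)
    | none => false
  | none => false

def pPair (g : List (Int × List (String × Int))) (m : List (Int × List (String × List String)))
    (x : Int × String) : Bool := pGoldNe g x.1 x.2 && pMore m x.1 x.2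

def pairsOf {β : Type} (l : List (Int × List (String × β))) : List (Int × String) :=
  l.flatMap (fun p => p.2.map (fun q => (p.1, q.1)))

theorem pvLookup_of_mem {α β : Type} [BEq α] [LawfulBEq α] {l : List (α × β)} {p : α × β}
    (hmem : p ∈ l) (hnd : (l.map Prod.fst).Nodup) : pvLookup l p.1 = some p.2 := by
  induction l with
  | nil => simp at hmem
  | cons a t ih =>
    simp only [List.map_cons, List.nodup_cons] at hnd
    rw [List.mem_cons] at hmem
    rcases hmem with rfl | hmem
    · simp [pvLookup]
    · have hne : ¬ (a.1 == p.1) = true := by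
        simp only [beq_iff_eq]
        intro h; exact hnd.1 (h ▸ List.mem_map_of_mem hmem)
      simpa [pvLookup, List.find?, hne] using ih hmem hnd.2

theorem mem_of_pvLookup {α β : Type} [BEq α] [LawfulBEq α] {l : List (α × β)} {k : α} {v : β}
    (h : pvLookup l k = some v) : (k, v) ∈ l := by
  simp only [pvLookup, Option.map_eq_some_iff] at h
  obtain ⟨p, hp, hv⟩ := h
  have hk := List.find?_some hp
  have hm := List.mem_of_find?_eq_some hp
  simp only [beq_iff_eq] at hk
  subst hk; rw [← hv]; exact hm

theorem mem_pairsOf_fst {β : Type} {l : List (Int × List (String × β))} {x : Int × String}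
    (h : x ∈ pairsOf l) : x.1 ∈ l.map Prod.fst := by
  simp only [pairsOf, List.mem_flatMap, List.mem_map] at h
  obtain ⟨p, hp, q, _, rfl⟩ := h
  exact List.mem_map_of_mem hp

theorem nodup_pairsOf {β : Type} {l : List (Int × List (String × β))}
    (h1 : (l.map Prod.fst).Nodup) (h2 : ∀ p ∈ l, (p.2.map Prod.fst).Nodup) :
    (pairsOf l).Nodup := by
  induction l with
  | nil => simp [pairsOf]
  | cons a t ih =>
    simp only [List.map_cons, List.nodup_cons] at h1
    have hinner : (a.2.map (fun q => (a.1, q.1))).Nodup := by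
      have := h2 a (by simp)
      have : ((a.2.map Prod.fst).map (fun w => (a.1, w))).Nodup :=
        this.map (fun _ _ h => by simpa using congrArg Prod.snd h)
      simpa [List.map_map, Function.comp] using this
    have htail : (pairsOf t).Nodup := ih h1.2 (fun p hp => h2 p (by simp [hp]))
    have hdisj : ∀ x ∈ a.2.map (fun q => (a.1, q.1)), x ∉ pairsOf t := by
      intro x hx hxt
      simp only [List.mem_map] at hx
      obtain ⟨q, _, rfl⟩ := hx
      exact h1.1 (mem_pairsOf_fst hxt)
    have : pairsOf (a :: t) = a.2.map (fun q => (a.1, q.1)) ++ pairsOf t := by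
      simp [pairsOf]
    rw [this, List.nodup_append]
    exact ⟨hinner, htail, fun x hx b hb he => hdisj x hx (he ▸ hb)⟩

-- membership of pairs satisfying pPair
theorem pPair_mem_pairsG {g : List (Int × List (String × Int))} {m : List (Int × List (String × List String))}
    {x : Int × String} (h : pPair g m x = true) : x ∈ pairsOf g := by
  simp only [pPair, Bool.and_eq_true] at h
  have hg := h.1
  cases hlg : pvLookup g x.1 with
  | none => simp [pGoldNe, hlg] at hg
  | some words =>
    cases hlw : pvLookup words x.2 with
    | none => simp [pGoldNe, hlg, hlw] at hg
    | some v =>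
      have hm1 := mem_of_pvLookup hlg
      have hm2 := mem_of_pvLookup hlw
      simp only [pairsOf, List.mem_flatMap]
      exact ⟨(x.1, words), hm1, by simpa using List.mem_map_of_mem (f := fun q => (x.1, q.1)) hm2⟩

theorem pPair_mem_pairsM {g : List (Int × List (String × Int))} {m : List (Int × List (String × List String))}
    {x : Int × String} (h : pPair g m x = true) : x ∈ pairsOf m := by
  simp only [pPair, Bool.and_eq_true] at h
  have hg := h.2
  cases hlg : pvLookup m x.1 with
  | none => simp [pMore, hlg] at hg
  | some inner =>
    cases hlw : pvLookup inner x.2 with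
    | none => simp [pMore, hlg, hlw] at hg
    | some ss =>
      have hm1 := mem_of_pvLookup hlg
      have hm2 := mem_of_pvLookup hlw
      simp only [pairsOf, List.mem_flatMap]
      exact ⟨(x.1, inner), hm1, by simpa using List.mem_map_of_mem (f := fun q => (x.1, q.1)) hm2⟩

-- countP over the flattened pair list
theorem countP_pairsOf {β : Type} (l : List (Int × List (String × β))) (P : Int × String → Bool) :
    (pairsOf l).countP P = (l.map (fun p => p.2.countP (fun q => P (p.1, q.1)))).sum := by
  induction l with
  | nil => simp [pairsOf]
  | cons a t ih =>
    have : pairsOf (a :: t) = a.2.map (fun q => (a.1, q.1)) ++ pairsOf t := by simp [pairsOf]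
    rw [this, List.countP_append, List.countP_map, ih]
    simp [Function.comp_def]

-- the two sides count the same set of (sent, word) pairs
theorem pairs_count_eq (g : List (Int × List (String × Int))) (m : List (Int × List (String × List String)))
    (hPre : Pre_mfs_evaluate g m) :
    (pairsOf g).countP (pPair g m) = (pairsOf m).countP (pPair g m) := by
  obtain ⟨h1, h2, h3, h4⟩ := hPre
  rw [List.countP_eq_length_filter, List.countP_eq_length_filter]
  have hperm : List.Perm ((pairsOf g).filter (pPair g m)) ((pairsOf m).filter (pPair g m)) := by
    rw [List.perm_ext_iff_of_nodup ((nodup_pairsOf h1 h2).filter _) ((nodup_pairsOf h3 h4).filter _)]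
    intro x
    simp only [List.mem_filter]
    constructor
    · rintro ⟨_, hP⟩; exact ⟨pPair_mem_pairsM hP, hP⟩
    · rintro ⟨_, hP⟩; exact ⟨pPair_mem_pairsG hP, hP⟩
  exact hperm.length_eq

-- characterisation of A's fold
theorem foldA_inner (m : List (Int × List (String × List String))) (s : Int)
    (l : List (String × Int)) (a b c d : Int) :
    l.foldl (pvStepA m s) (a, b, c, d) =
      (a + (l.countP pSame : Nat),
       b + (l.countP (fun q => !pSame q && !pMore m s q.1) : Nat),
       c + (l.countP (fun q => !pSame q && pMore m s q.1) : Nat),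
       d + (l.length : Nat)) := by
  induction l generalizing a b c d with
  | nil => simp
  | cons q t ih =>
    have hstep : pvStepA m s (a, b, c, d) q =
        (a + (if pSame q then 1 else 0),
         b + (if !pSame q && !pMore m s q.1 then 1 else 0),
         c + (if !pSame q && pMore m s q.1 then 1 else 0),
         d + 1) := by
      unfold pvStepA pSame pMore
      by_cases hq : q.2 = 1
      · simp [hq]
      · cases hlg : pvLookup m s with
        | none => simp [hq]
        | some inner =>
          cases hlw : pvLookup inner q.1 with
          | none => simp [hq, hlw]
          | some senses =>
            by_cases hc : "1" ∈ senses <;> simp [hq, hlw, hc]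
    rw [List.foldl_cons, hstep, ih]
    by_cases h1 : pSame q = true <;> by_cases h2 : pMore m s q.1 = true <;>
      simp only [List.countP_cons, List.length_cons, h1, h2, Bool.not_true, Bool.not_false,
        Bool.false_and, Bool.true_and, Bool.and_self, if_true, Prod.mk.injEq] <;>
      refine ⟨?_, ?_, ?_, ?_⟩ <;> push_cast <;> omega

theorem foldA_outer (m : List (Int × List (String × List String)))
    (g : List (Int × List (String × Int))) (a b c d : Int) :
    g.foldl (fun st p => p.2.foldl (pvStepA m p.1) st) (a, b, c, d) =
      (a + ((g.map (fun p => (p.2.countP pSame : Int))).sum),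
       b + ((g.map (fun p => (p.2.countP (fun q => !pSame q && !pMore m p.1 q.1) : Int))).sum),
       c + ((g.map (fun p => (p.2.countP (fun q => !pSame q && pMore m p.1 q.1) : Int))).sum),
       d + ((g.map (fun p => (p.2.length : Int))).sum)) := by
  induction g generalizing a b c d with
  | nil => simp
  | cons p t ih =>
    rw [List.foldl_cons, foldA_inner, ih]
    simp only [List.map_cons, List.sum_cons]
    refine Prod.ext ?_ (Prod.ext ?_ (Prod.ext ?_ ?_)) <;> simp <;> ring

-- B's sum folds
theorem foldl_add_sum {α : Type} (l : List α) (f : α → Int) (a : Int) :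
    l.foldl (fun acc x => acc + f x) a = a + (l.map f).sum := by
  induction l generalizing a with
  | nil => simp
  | cons x t ih => rw [List.foldl_cons, ih]; simp; ring

-- the three per-word predicates partition each sentence
theorem countP_partition (m : List (Int × List (String × List String))) (s : Int)
    (l : List (String × Int)) :
    l.countP pSame + l.countP (fun q => !pSame q && !pMore m s q.1)
      + l.countP (fun q => !pSame q && pMore m s q.1) = l.length := by
  induction l with
  | nil => simp
  | cons q t ih =>
    by_cases h1 : pSame q = true <;> by_cases h2 : pMore m s q.1 = true <;>
      simp [h1, h2] <;> omega

-- diff words are the complement of same and good within each sentence (no side condition needed)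
theorem diff_sum (m : List (Int × List (String × List String))) (g : List (Int × List (String × Int))) :
    (g.map (fun p => (p.2.countP (fun q => !pSame q && !pMore m p.1 q.1) : Int))).sum
      = (g.map (fun p => (p.2.length : Int))).sum
        - (g.map (fun p => (p.2.countP pSame : Int))).sum
        - (g.map (fun p => (p.2.countP (fun q => !pSame q && pMore m p.1 q.1) : Int))).sum := by
  induction g with
  | nil => simp
  | cons p t ih =>
    simp only [List.map_cons, List.sum_cons]
    have hpart := countP_partition m p.1 p.2
    omega

-- A's good count equals the pair count on the gold side
theorem good_eq_pairsG (g : List (Int × List (String × Int))) (m : List (Int × List (String × List String)))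
    (h1 : (g.map Prod.fst).Nodup) (h2 : ∀ p ∈ g, (p.2.map Prod.fst).Nodup) :
    (g.map (fun p => (p.2.countP (fun q => !pSame q && pMore m p.1 q.1) : Int))).sum
      = ((pairsOf g).countP (pPair g m) : Nat) := by
  rw [countP_pairsOf]
  have : ∀ p ∈ g, (p.2.countP (fun q => pPair g m (p.1, q.1)))
      = p.2.countP (fun q => !pSame q && pMore m p.1 q.1) := by
    intro p hp
    apply List.countP_congr
    intro q hq
    have hlg : pvLookup g p.1 = some p.2 := pvLookup_of_mem hp h1
    have hlw : pvLookup p.2 q.1 = some q.2 := pvLookup_of_mem hq (h2 p hp)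
    simp only [pPair, pGoldNe, hlg, hlw, pSame]
    cases hm : pMore m p.1 q.1 <;> by_cases hq1 : q.2 = 1 <;> simp [hq1]
  rw [List.map_congr_left this]
  push_cast
  simp [List.map_map, Function.comp_def]

-- B's good count equals the pair count on the more_senses side
theorem good_eq_pairsM (g : List (Int × List (String × Int))) (m : List (Int × List (String × List String)))
    (h3 : (m.map Prod.fst).Nodup) (h4 : ∀ p ∈ m, (p.2.map Prod.fst).Nodup) :
    (m.map (fun p => (p.2.countP (pvGoodB g p.1) : Int))).sum
      = ((pairsOf m).countP (pPair g m) : Nat) := by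
  rw [countP_pairsOf]
  have : ∀ p ∈ m, (p.2.countP (fun q => pPair g m (p.1, q.1)))
      = p.2.countP (pvGoodB g p.1) := by
    intro p hp
    apply List.countP_congr
    intro q hq
    have hlg : pvLookup m p.1 = some p.2 := pvLookup_of_mem hp h3
    have hlw : pvLookup p.2 q.1 = some q.2 := pvLookup_of_mem hq (h4 p hp)
    simp only [pPair, pMore, pGoldNe, pvGoodB, hlg, hlw]
    cases hgl : pvLookup g p.1 with
    | none => simp
    | some words =>
      cases hgw : pvLookup words q.1 with
      | none => simp [hgw]
      | some v => by_cases hv : v = 1 <;> simp [hgw, hv]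
  rw [List.map_congr_left this]
  push_cast
  simp [List.map_map, Function.comp_def]

-- ===== VERDICT (by name: the statement is the Claim_ definition above) =====
theorem mfs_evaluate_spec : Claim_equal_mfs_evaluate := by
  intro g m _hDom hPre
  obtain ⟨h1, h2, h3, h4⟩ := hPre
  unfold Spec_mfs_evaluate mfs_evaluate mfs_evaluate_alt
  rw [foldA_outer, foldl_add_sum, foldl_add_sum, foldl_add_sum]
  have hgood : (g.map (fun p => (p.2.countP (fun q => !pSame q && pMore m p.1 q.1) : Int))).sum
      = (m.map (fun p => (p.2.countP (pvGoodB g p.1) : Int))).sum := by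
    rw [good_eq_pairsG g m h1 h2, good_eq_pairsM g m h3 h4,
        pairs_count_eq g m ⟨h1, h2, h3, h4⟩]
  have hdiff := diff_sum m g
  rw [hgood] at hdiff
  rw [hdiff]
  have hps : (fun q : String × Int => q.2 == 1) = pSame := rfl
  rw [hps]
  simp only [Prod.mk.injEq]
  exact ⟨trivial, by ring, by simpa using hgood, trivial⟩
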